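-- pv_equiv track=rewrite | github.com/nickagliano/aoc | 2023/8/main.py | navigate_part_two
-- ===== SOURCE A (Python) =====
-- def navigate_part_two(map, directions, start, num_steps):
--     key = start
--
--     for direction in directions:
--         num_steps += 1
--
--         left, right = map[key]
--
--         if direction == "L":
--             key = left
--             end = left
--         elif direction == "R":
--             key = right
--             end = right
--         else:
--             raise ValueError("Invalid direction encountered")
--
--         if end[-1] == "Z":
--             return num_steps, end
--         else:
--             key = end
--
--     num_steps, key = navigate_part_two(map, directions, key, num_steps)
--
--     return num_steps, key
-- ===== SOURCE B (Python) =====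
-- def navigate_part_two(map, directions, start, num_steps):
--     key = start
--     n = len(directions)
--     i = 0
--     while True:
--         direction = directions[i % n]
--         i += 1
--         num_steps += 1
--         left, right = map[key]
--         if direction == "L":
--             end = left
--         elif direction == "R":
--             end = right
--         else:
--             raise ValueError("Invalid direction encountered")
--         if end[-1] == "Z":
--             return num_steps, end
--         key = end
-- ===== Notes on version B (the rewrite author's own statement) =====
-- stated objective: simpler
-- what changed: Replaces A's recursion-on-exhaustion (restart the whole function when the direction list runs out) with one flat infinite loop indexing directions[i % n]; on inputs where no Z-node is ever reached A raises RecursionError while B loops forever, so those inputs are outside Pre_.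
import Mathlib
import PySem

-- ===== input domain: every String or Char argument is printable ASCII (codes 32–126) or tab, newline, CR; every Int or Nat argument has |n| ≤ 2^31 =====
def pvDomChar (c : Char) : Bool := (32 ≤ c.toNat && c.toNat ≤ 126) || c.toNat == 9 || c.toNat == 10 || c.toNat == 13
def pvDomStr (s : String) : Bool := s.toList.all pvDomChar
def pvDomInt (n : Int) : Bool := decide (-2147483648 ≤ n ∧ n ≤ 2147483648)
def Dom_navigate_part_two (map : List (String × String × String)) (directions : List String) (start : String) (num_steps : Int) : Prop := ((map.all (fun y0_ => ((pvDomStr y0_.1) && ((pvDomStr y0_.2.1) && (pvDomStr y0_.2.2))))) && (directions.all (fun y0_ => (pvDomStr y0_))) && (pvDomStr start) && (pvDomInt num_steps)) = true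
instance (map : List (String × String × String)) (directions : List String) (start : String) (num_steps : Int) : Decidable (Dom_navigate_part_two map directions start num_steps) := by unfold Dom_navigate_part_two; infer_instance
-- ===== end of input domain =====

-- B replaces A's recursion-on-exhaustion by one flat loop over a running index i % n; equivalence
-- is on Pre_ (the inputs where A returns); outside Pre_ A raises and B's loop never returns.

-- shared helper: the Python dict lookup map[key] (the harness builds the dict from the triples in order)
def pvLookup (m : List (String × String × String)) (k : String) : Option (String × String) :=
  (PySem.Dict.ofList (m.map (fun t => (t.1, (t.2.1, t.2.2))))).get? k

-- ===== PORT A =====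
-- the 'for direction in directions' body; Sum.inl = early return, Sum.inr = loop exhausted (fall through)
def navInnerA (m : List (String × String × String)) : List String → String → Int → Option ((Int × String) ⊕ (String × Int))
  | [], key, s => some (Sum.inr (key, s))
  | dir :: rest, key, s =>
    match pvLookup m key with
    | none => none                     -- KeyError
    | some (l, r) =>
      match (if dir = "L" then some l else if dir = "R" then some r else none) with
      | none => none                   -- ValueError
      | some e =>
        match PySem.Str.pyGet? e (-1) with
        | none => none                 -- IndexError on end[-1]
        | some c => if c = 'Z' then some (Sum.inl (s + 1, e)) else navInnerA m rest e (s + 1)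

-- the tail recursion 'num_steps, key = navigate_part_two(...)'; fuel bounds the restarts (none = A never returns)
def navOuterA (m : List (String × String × String)) (d : List String) : Nat → String → Int → Option (Int × String)
  | 0, _, _ => none
  | fuel + 1, key, s =>
    match navInnerA m d key s with
    | none => none
    | some (Sum.inl res) => some res
    | some (Sum.inr p) => navOuterA m d fuel p.1 p.2

def navigate_part_two (map : List (String × String × String)) (directions : List String) (start : String) (num_steps : Int) : Int × String :=
  (navOuterA map directions (map.length + 1) start num_steps).getD (0, "")

-- ===== PORT B =====
-- the single 'while True' loop with absolute counter i, direction = directions[i % n]; fuel makes it total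
def navLoopB (m : List (String × String × String)) (d : List String) (n : Nat) : Nat → Nat → String → Int → Option (Int × String)
  | 0, _, _, _ => none
  | fuel + 1, i, key, s =>
    match (if n = 0 then none else d[i % n]?) with   -- ZeroDivisionError when n = 0
    | none => none
    | some dir =>
      match pvLookup m key with
      | none => none
      | some (l, r) =>
        match (if dir = "L" then some l else if dir = "R" then some r else none) with
        | none => none
        | some e =>
          match PySem.Str.pyGet? e (-1) with
          | none => none
          | some c => if c = 'Z' then some (s + 1, e) else navLoopB m d n fuel (i + 1) e (s + 1)

def navigate_part_two_alt (map : List (String × String × String)) (directions : List String) (start : String) (num_steps : Int) : Int × String :=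
  (navLoopB map directions directions.length ((map.length + 1) * directions.length) 0 start num_steps).getD (0, "")

-- ===== PRECONDITION & SPEC =====
-- the step function of the walk: from node key at absolute step i, the next node (none = an exception)
def pvStep (m : List (String × String × String)) (d : List String) (i : Nat) (key : String) : Option String :=
  match (if d.length = 0 then none else d[i % d.length]?) with
  | none => none
  | some dir =>
    match pvLookup m key with
    | none => none
    | some (l, r) =>
      match (if dir = "L" then some l else if dir = "R" then some r else none) with
      | none => none
      | some e => if (PySem.Str.pyGet? e (-1)).isSome then some e else none

def pvTraj (m : List (String × String × String)) (d : List String) (start : String) : Nat → Option String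
  | 0 => some start
  | k + 1 =>
    match pvTraj m d start k with
    | none => none
    | some key => pvStep m d k key

def pvHit (m : List (String × String × String)) (d : List String) (start : String) (k : Nat) : Bool :=
  match pvTraj m d start (k + 1) with
  | some e => PySem.Str.pyGet? e (-1) == some 'Z'
  | none => false

-- Pre_ = exactly the inputs on which the Python A returns: some step k of the walk lands on a node ending
-- in 'Z' with no exception before it; a first such k is < (|map|+1)·|directions| by pigeonhole on the
-- states (key, k mod |directions|), so the bound excludes nothing A returns on.  Outside Pre_ A raises
-- (KeyError/ValueError/IndexError/ZeroDivisionError on []/RecursionError) and B raises or loops forever.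
def Pre_navigate_part_two (map : List (String × String × String)) (directions : List String) (start : String) (num_steps : Int) : Prop :=
  ∃ k, k < (map.length + 1) * directions.length ∧ pvHit map directions start k = true

instance (map : List (String × String × String)) (directions : List String) (start : String) (num_steps : Int) : Decidable (Pre_navigate_part_two map directions start num_steps) := by unfold Pre_navigate_part_two; infer_instance

def pvWitness_navigate_part_two : (List (String × String × String)) × List String × String × Int :=
  ([("AA", "BB", "ZZ")], ["R"], "AA", 0)

def Spec_navigate_part_two (map : List (String × String × String)) (directions : List String) (start : String) (num_steps : Int) (out : Int × String) : Prop := out = navigate_part_two_alt map directions start num_steps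
instance (map : List (String × String × String)) (directions : List String) (start : String) (num_steps : Int) (out : Int × String) : Decidable (Spec_navigate_part_two map directions start num_steps out) := by unfold Spec_navigate_part_two; infer_instance

-- ===== CLAIM (what is proved, stated in full; the proofs are below) =====
def Claim_equal_navigate_part_two : Prop := ∀ (map : List (String × String × String)) (directions : List String) (start : String) (num_steps : Int), Dom_navigate_part_two map directions start num_steps → Pre_navigate_part_two map directions start num_steps → Spec_navigate_part_two map directions start num_steps (navigate_part_two map directions start num_steps)

-- ===== LEMMAS AND PROOFS =====

-- B's loop only sees the index through i % n, so shifting i by a full period changes nothing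
theorem navLoopB_period (m : List (String × String × String)) (d : List String) :
    ∀ (fb i : Nat) (key : String) (s : Int),
      navLoopB m d d.length fb (i + d.length) key s = navLoopB m d d.length fb i key s := by
  intro fb
  induction fb with
  | zero => intro i key s; rfl
  | succ fb ih =>
    intro i key s
    have h : i + d.length + 1 = (i + 1) + d.length := by omega
    simp only [navLoopB, Nat.add_mod_right, h, ih]

-- one pass of A's for-loop over the suffix l = d.drop i agrees with B's loop step for step
theorem pass_eq (m : List (String × String × String)) (d : List String) :
    ∀ (l : List String) (i : Nat) (key : String) (s : Int) (extra : Nat),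
      i + l.length = d.length → d.drop i = l →
      navLoopB m d d.length (l.length + extra) i key s =
        (match navInnerA m l key s with
         | none => none
         | some (Sum.inl res) => some res
         | some (Sum.inr p) => navLoopB m d d.length extra 0 p.1 p.2) := by
  intro l
  induction l with
  | nil =>
    intro i key s extra h1 _
    have hi : i = d.length := by simpa using h1
    subst hi
    have := navLoopB_period m d extra 0 key s
    simpa [navInnerA] using this
  | cons dir rest ih =>
    intro i key s extra h1 h2
    have hi : i < d.length := by simp at h1; omega
    have hd0 : ¬ d.length = 0 := by omega
    have hget : d[i % d.length]? = some dir := by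
      rw [Nat.mod_eq_of_lt hi]
      have h0 : (d.drop i)[0]? = some dir := by rw [h2]; rfl
      rw [List.getElem?_drop] at h0
      simpa using h0
    have hdrop : d.drop (i + 1) = rest := by
      have h3 : d.drop (i + 1) = (d.drop i).drop 1 := by rw [List.drop_drop]
      rw [h3, h2]; rfl
    have hf : (dir :: rest).length + extra = (rest.length + extra) + 1 := by simp; omega
    rw [hf]
    simp only [navLoopB, navInnerA, hd0, if_false, hget]
    cases hL : pvLookup m key with
    | none => rfl
    | some pr =>
      obtain ⟨l', r'⟩ := pr
      cases hE : (if dir = "L" then some l' else if dir = "R" then some r' else none) with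
      | none => simp only [hE]
      | some e =>
        simp only [hE]
        cases hC : PySem.Str.pyGet? e (-1) with
        | none => rfl
        | some c =>
          by_cases hz : c = 'Z'
          · simp only [if_pos hz]
          · simp only [if_neg hz]
            exact ih (i + 1) e (s + 1) extra (by simp at h1 ⊢; omega) hdrop

-- A's restart recursion with fuel fA equals B's flat loop with fuel fA·|d|
theorem outer_eq (m : List (String × String × String)) (d : List String) :
    ∀ (fA : Nat) (key : String) (s : Int),
      navOuterA m d fA key s = navLoopB m d d.length (fA * d.length) 0 key s := by
  intro fA
  induction fA with
  | zero => intro key s; rw [Nat.zero_mul]; rfl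
  | succ fA ih =>
    intro key s
    have hf : (fA + 1) * d.length = d.length + fA * d.length := by ring
    rw [hf, pass_eq m d d 0 key s (fA * d.length) (by simp) (by simp)]
    simp only [navOuterA]
    cases hI : navInnerA m d key s with
    | none => rfl
    | some v =>
      cases v with
      | inl res => rfl
      | inr p => exact ih p.1 p.2

-- ===== VERDICT (by name: the statement is the Claim_ definition above) =====
theorem navigate_part_two_spec : Claim_equal_navigate_part_two := by
  intro map directions start num_steps _ _
  unfold Spec_navigate_part_two navigate_part_two navigate_part_two_alt
  rw [outer_eq]
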